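-- pv_equiv track=rewrite | github.com/GerardReaver/founders-puzzle | founders_puzzle.py | no_same_color_or_symbol
-- ===== SOURCE A (Python) =====
-- founders = [
--     "Deepmire", "Funflame", "Hypnotums", "Imaginez",
--     "Miraculo", "Rimbleby", "Septimus", "Tremenda"
-- ]
--
-- houses = ["Gianteye", "Meramaid", "Longmous", "Vidopnir"]
--
-- founder_info = {
--     "Deepmire": {"color": "blue", "symbol": "stars"},
--     "Funflame": {"color": "red", "symbol": "swirls"},
--     "Hypnotums": {"color": "red", "symbol": "stars"},
--     "Imaginez": {"color": "yellow", "symbol": "moons"},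
--     "Miraculo": {"color": "red", "symbol": "moons"},
--     "Rimbleby": {"color": "blue", "symbol": "moons"},
--     "Septimus": {"color": "yellow", "symbol": "stars"},
--     "Tremenda": {"color": "blue", "symbol": "swirls"},
-- }
--
-- def no_same_color_or_symbol(*assignments):
--     assignments = dict(zip(founders, assignments))
--     for house in houses:
--         assigned = [f for f in assignments if assignments[f] == house]
--         colors = [founder_info[f]["color"] for f in assigned]
--         symbols = [founder_info[f]["symbol"] for f in assigned]
--         if len(colors) != len(set(colors)):
--             return False
--         if len(symbols) != len(set(symbols)):
--             return False
--     return True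
-- ===== SOURCE B (Python) =====
-- founders = [
--     "Deepmire", "Funflame", "Hypnotums", "Imaginez",
--     "Miraculo", "Rimbleby", "Septimus", "Tremenda"
-- ]
--
-- houses = ["Gianteye", "Meramaid", "Longmous", "Vidopnir"]
--
-- founder_info = {
--     "Deepmire": {"color": "blue", "symbol": "stars"},
--     "Funflame": {"color": "red", "symbol": "swirls"},
--     "Hypnotums": {"color": "red", "symbol": "stars"},
--     "Imaginez": {"color": "yellow", "symbol": "moons"},
--     "Miraculo": {"color": "red", "symbol": "moons"},
--     "Rimbleby": {"color": "blue", "symbol": "moons"},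
--     "Septimus": {"color": "yellow", "symbol": "stars"},
--     "Tremenda": {"color": "blue", "symbol": "swirls"},
-- }
--
--
-- def _clash(a, b):
--     # two founders placed in the same house sharing a color or a symbol
--     return b[1] == a[1] and (
--         founder_info[a[0]]["color"] == founder_info[b[0]]["color"]
--         or founder_info[a[0]]["symbol"] == founder_info[b[0]]["symbol"])
--
--
-- def no_same_color_or_symbol(*assignments):
--     # pairwise scan over the founder/house pairs instead of grouping by house:
--     # the assignment is valid iff no later founder clashes with an earlier one
--     # placed in the same known house
--     pairs = list(zip(founders, assignments))
--     for i, pair in enumerate(pairs):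
--         if pair[1] in houses:
--             if any(_clash(pair, q) for q in pairs[i + 1:]):
--                 return False
--     return True
-- ===== Notes on version B (the rewrite author's own statement) =====
-- stated objective: alternative
-- what changed: Replaced A's per-house grouping (rebuilding the assigned list, color list, symbol list and their sets for each of the four houses) by a single pairwise scan of the zipped founder/house pairs that returns False on the first pair of founders placed in the same known house sharing a color or symbol.
import Mathlib
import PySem

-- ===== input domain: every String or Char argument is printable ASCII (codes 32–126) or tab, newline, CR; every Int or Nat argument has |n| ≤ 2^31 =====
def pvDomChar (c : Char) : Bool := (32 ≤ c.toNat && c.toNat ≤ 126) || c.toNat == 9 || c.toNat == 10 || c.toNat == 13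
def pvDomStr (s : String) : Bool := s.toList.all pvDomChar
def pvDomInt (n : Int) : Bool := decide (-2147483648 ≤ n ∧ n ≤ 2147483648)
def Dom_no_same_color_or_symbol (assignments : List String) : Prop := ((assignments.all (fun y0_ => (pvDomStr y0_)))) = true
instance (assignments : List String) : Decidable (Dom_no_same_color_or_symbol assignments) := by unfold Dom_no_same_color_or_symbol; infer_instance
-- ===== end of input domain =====

-- B replaces A's group-by-house-then-duplicate-check structure by a single pairwise scan of the
-- founder/house pairs (objective: alternative decomposition, same cost on these fixed-size lists).

-- module-level constants shared by both Python versions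
def pvFounders : List String :=
  ["Deepmire", "Funflame", "Hypnotums", "Imaginez",
   "Miraculo", "Rimbleby", "Septimus", "Tremenda"]

def pvHouses : List String := ["Gianteye", "Meramaid", "Longmous", "Vidopnir"]

def pvFounderInfo : PySem.Dict String (PySem.Dict String String) :=
  PySem.Dict.ofList
    [("Deepmire", PySem.Dict.ofList [("color", "blue"), ("symbol", "stars")]),
     ("Funflame", PySem.Dict.ofList [("color", "red"), ("symbol", "swirls")]),
     ("Hypnotums", PySem.Dict.ofList [("color", "red"), ("symbol", "stars")]),
     ("Imaginez", PySem.Dict.ofList [("color", "yellow"), ("symbol", "moons")]),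
     ("Miraculo", PySem.Dict.ofList [("color", "red"), ("symbol", "moons")]),
     ("Rimbleby", PySem.Dict.ofList [("color", "blue"), ("symbol", "moons")]),
     ("Septimus", PySem.Dict.ofList [("color", "yellow"), ("symbol", "stars")]),
     ("Tremenda", PySem.Dict.ofList [("color", "blue"), ("symbol", "swirls")])]

-- ===== PORT A =====
-- 'for house in houses: … return False … / return True' as structural recursion over the houses;
-- founder_info[f] / info["color"] are ported with .get? + a default that is unreachable
-- because every f ranges over keys of dict(zip(founders, …)), all of which are founders.
def pvLoopA (asg : PySem.Dict String String) : List String → Bool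
  | [] => true
  | house :: rest =>
    let assigned := asg.keys.filter (fun f => asg.getD f "" == house)
    let colors := assigned.map (fun f => ((pvFounderInfo.get? f).getD PySem.Dict.empty).getD "color" "")
    let symbols := assigned.map (fun f => ((pvFounderInfo.get? f).getD PySem.Dict.empty).getD "symbol" "")
    if colors.length ≠ (PySem.Set.ofList colors).length then false
    else if symbols.length ≠ (PySem.Set.ofList symbols).length then false
    else pvLoopA asg rest

def no_same_color_or_symbol (assignments : List String) : Bool :=
  pvLoopA (PySem.Dict.ofList (pvFounders.zip assignments)) pvHouses

-- ===== PORT B =====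
def pvColor (f : String) : String :=
  ((pvFounderInfo.get? f).getD PySem.Dict.empty).getD "color" ""

def pvSymbol (f : String) : String :=
  ((pvFounderInfo.get? f).getD PySem.Dict.empty).getD "symbol" ""

-- _clash from Source B
def pvClash (a b : String × String) : Bool :=
  b.2 == a.2 && (pvColor a.1 == pvColor b.1 || pvSymbol a.1 == pvSymbol b.1)

-- the indexed 'for i, pair in enumerate(pairs)' with 'pairs[i+1:]' is the tail of the recursion
def pvLoopB : List (String × String) → Bool
  | [] => true
  | pair :: rest =>
    if pvHouses.contains pair.2 then
      if rest.any (fun q => pvClash pair q) then false else pvLoopB rest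
    else pvLoopB rest

def no_same_color_or_symbol_alt (assignments : List String) : Bool :=
  pvLoopB (pvFounders.zip assignments)

-- ===== PRECONDITION & SPEC =====
def Spec_no_same_color_or_symbol (assignments : List String) (out : Bool) : Prop := out = no_same_color_or_symbol_alt assignments
instance (assignments : List String) (out : Bool) : Decidable (Spec_no_same_color_or_symbol assignments out) := by unfold Spec_no_same_color_or_symbol; infer_instance

-- ===== CLAIM (what is proved, stated in full; the proofs are below) =====
def Claim_equal_no_same_color_or_symbol : Prop := ∀ (assignments : List String), Dom_no_same_color_or_symbol assignments → Spec_no_same_color_or_symbol assignments (no_same_color_or_symbol assignments)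

-- ===== LEMMAS AND PROOFS =====

-- the clash-freedom relation B's pass checks between an earlier and a later pair
def pvR (a b : String × String) : Prop :=
  a.2 = b.2 → a.2 ∈ pvHouses → pvColor a.1 ≠ pvColor b.1 ∧ pvSymbol a.1 ≠ pvSymbol b.1

theorem pvLoopB_iff (ps : List (String × String)) :
    pvLoopB ps = true ↔ ps.Pairwise pvR := by
  induction ps with
  | nil => simp [pvLoopB]
  | cons p rest ih =>
    by_cases hc : p.2 ∈ pvHouses
    · have hcc : pvHouses.contains p.2 = true := by simpa using hc
      rw [List.pairwise_cons]
      by_cases ha : rest.any (fun q => pvClash p q) = true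
      · simp only [pvLoopB, hcc, if_true, ha, Bool.false_eq_true, false_iff]
        obtain ⟨q, hq, hclash⟩ := List.any_eq_true.mp ha
        intro ⟨hall, _⟩
        have := hall q hq
        simp only [pvClash, Bool.and_eq_true, beq_iff_eq, Bool.or_eq_true] at hclash
        exact absurd (this hclash.1.symm hc) (by tauto)
      · have ha' : rest.any (fun q => pvClash p q) = false := by simpa using ha
        simp only [pvLoopB, hcc, if_true, ha', Bool.false_eq_true, if_false, ih]
        have hall : ∀ q ∈ rest, pvClash p q = false := by
          simpa [List.any_eq_true] using ha
        constructor
        · intro h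
          refine ⟨fun q hq heq _ => ?_, h⟩
          have hcf := hall q hq
          simp [pvClash, heq] at hcf
          tauto
        · exact fun h => h.2
    · have hcc : pvHouses.contains p.2 = false := by simpa using hc
      simp only [pvLoopB, hcc, Bool.false_eq_true, if_false, ih, List.pairwise_cons]
      constructor
      · intro h
        exact ⟨fun q _ heq hmem => absurd hmem hc, h⟩
      · exact fun h => h.2

theorem pvSetLen_iff (l : List String) :
    ((PySem.Set.ofList l).length = l.length) ↔ l.Nodup := by
  have h1 : (PySem.Set.ofList l).toFinset = l.toFinset := by
    ext x; simp [List.mem_toFinset, PySem.Set.mem_ofList]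
  have h2 := List.toFinset_card_of_nodup (PySem.Set.nodup_ofList l)
  constructor
  · intro h
    have hc : l.toFinset.card = l.length := by rw [← h1, h2, h]
    exact Multiset.toFinset_card_eq_card_iff_nodup.mp (by simpa using hc)
  · intro h
    rw [← h2, h1, List.toFinset_card_of_nodup h]

theorem pvItems_ofList (ps : List (String × String)) (h : (ps.map Prod.fst).Nodup) :
    (PySem.Dict.ofList ps).items = ps := by
  have := PySem.Dict.items_foldl_insert_fresh ps Prod.fst Prod.snd PySem.Dict.empty
    (by intro a _; simp [PySem.Dict.contains_empty]) h
  simpa [PySem.Dict.ofList] using this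

theorem pvAssigned_eq (ps : List (String × String)) (h : (ps.map Prod.fst).Nodup)
    (house : String) :
    (PySem.Dict.ofList ps).keys.filter (fun f => (PySem.Dict.ofList ps).getD f "" == house)
      = (ps.filter (fun p => p.2 == house)).map Prod.fst := by
  have hitems := pvItems_ofList ps h
  have hkeys : (PySem.Dict.ofList ps).keys = ps.map Prod.fst := by
    simp only [PySem.Dict.keys, hitems]
  have hknd : (PySem.Dict.ofList ps).keys.Nodup := by rw [hkeys]; exact h
  rw [hkeys, List.filter_map]
  congr 1
  apply List.filter_congr
  intro p hp
  have : (PySem.Dict.ofList ps).getD p.1 "" = p.2 :=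
    PySem.Dict.getD_of_mem_items _ (by rw [hitems]; exact hp) hknd ""
  simp [this]

theorem pvNodup_map_filter_iff (f : String × String → String)
    (p : String × String → Bool) (ps : List (String × String)) :
    ((ps.filter p).map f).Nodup ↔
      ∀ a b : String × String, [a, b].Sublist ps → p a = true → p b = true → f a ≠ f b := by
  rw [List.Nodup, List.pairwise_iff_forall_sublist]
  constructor
  · intro h a b hs hpa hpb
    have hf : [a, b].Sublist (ps.filter p) := by
      have := hs.filter p
      simpa [List.filter, hpa, hpb] using this
    exact h (by simpa using hf.map f)
  · intro h x y hs
    obtain ⟨l', hl', hmap⟩ := List.sublist_map_iff.mp hs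
    match l', hmap with
    | [a, b], hmap =>
      have hab : [a, b].Sublist ps := hl'.trans List.filter_sublist
      have hpa : p a = true := (List.mem_filter.mp (hl'.mem (by simp))).2
      have hpb : p b = true := (List.mem_filter.mp (hl'.mem (by simp))).2
      obtain ⟨hx, hy⟩ : f a = x ∧ f b = y := by
        simp only [List.map] at hmap
        exact ⟨(List.cons.injEq _ _ _ _ ▸ hmap).1.symm, by
          have := (List.cons.injEq _ _ _ _ ▸ hmap).2
          exact (by simpa using congrArg (fun l => l.headI) this : y = f b).symm⟩
      subst hx hy
      exact h a b hab hpa hpb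

theorem pvLoopA_iff (ps : List (String × String)) (h : (ps.map Prod.fst).Nodup)
    (hs : List String) :
    pvLoopA (PySem.Dict.ofList ps) hs = true ↔
      ∀ house ∈ hs,
        (∀ a b : String × String, [a, b].Sublist ps → a.2 = house → b.2 = house →
          pvColor a.1 ≠ pvColor b.1) ∧
        (∀ a b : String × String, [a, b].Sublist ps → a.2 = house → b.2 = house →
          pvSymbol a.1 ≠ pvSymbol b.1) := by
  induction hs with
  | nil => simp [pvLoopA]
  | cons house rest ih =>
    have hasg := pvAssigned_eq ps h house
    have hcolors :
        ((PySem.Dict.ofList ps).keys.filter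
            (fun f => (PySem.Dict.ofList ps).getD f "" == house)).map
            (fun f => ((pvFounderInfo.get? f).getD PySem.Dict.empty).getD "color" "")
          = (ps.filter (fun p => p.2 == house)).map (fun p => pvColor p.1) := by
      rw [hasg, List.map_map]; rfl
    have hsymbols :
        ((PySem.Dict.ofList ps).keys.filter
            (fun f => (PySem.Dict.ofList ps).getD f "" == house)).map
            (fun f => ((pvFounderInfo.get? f).getD PySem.Dict.empty).getD "symbol" "")
          = (ps.filter (fun p => p.2 == house)).map (fun p => pvSymbol p.1) := by
      rw [hasg, List.map_map]; rfl
    have hcnd := pvNodup_map_filter_iff (fun p => pvColor p.1) (fun p => p.2 == house) ps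
    have hsnd := pvNodup_map_filter_iff (fun p => pvSymbol p.1) (fun p => p.2 == house) ps
    simp only [pvLoopA, hcolors, hsymbols]
    by_cases hcl : ((ps.filter (fun p => p.2 == house)).map (fun p => pvColor p.1)).Nodup
    · by_cases hsy : ((ps.filter (fun p => p.2 == house)).map (fun p => pvSymbol p.1)).Nodup
      · rw [if_neg (by rw [ne_eq, not_not, eq_comm, pvSetLen_iff]; exact hcl),
          if_neg (by rw [ne_eq, not_not, eq_comm, pvSetLen_iff]; exact hsy), ih]
        constructor
        · intro hrest h' hmem
          rcases List.mem_cons.mp hmem with rfl | hmem'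
          · refine ⟨fun a b hsub ha hb => ?_, fun a b hsub ha hb => ?_⟩
            · exact (hcnd.mp hcl) a b hsub (by simp [ha]) (by simp [hb])
            · exact (hsnd.mp hsy) a b hsub (by simp [ha]) (by simp [hb])
          · exact hrest h' hmem'
        · intro hall h' hmem
          exact hall h' (List.mem_cons_of_mem _ hmem)
      · rw [if_neg (by rw [ne_eq, not_not, eq_comm, pvSetLen_iff]; exact hcl),
          if_pos (by rw [ne_eq, eq_comm, pvSetLen_iff]; exact hsy)]
        simp only [Bool.false_eq_true, false_iff]
        intro hall
        apply hsy
        apply hsnd.mpr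
        intro a b hsub ha hb
        exact (hall house (by simp)).2 a b hsub (by simpa using ha) (by simpa using hb)
    · rw [if_pos (by rw [ne_eq, eq_comm, pvSetLen_iff]; exact hcl)]
      simp only [Bool.false_eq_true, false_iff]
      intro hall
      apply hcl
      apply hcnd.mpr
      intro a b hsub ha hb
      exact (hall house (by simp)).1 a b hsub (by simpa using ha) (by simpa using hb)

theorem pvZip_fst_sublist {α β : Type} : ∀ (l₁ : List α) (l₂ : List β),
    ((l₁.zip l₂).map Prod.fst).Sublist l₁
  | [], _ => by simp
  | _ :: _, [] => by simp
  | a :: l₁, b :: l₂ => by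
    simpa using List.Sublist.cons₂ a (pvZip_fst_sublist l₁ l₂)

-- ===== VERDICT (by name: the statement is the Claim_ definition above) =====
theorem no_same_color_or_symbol_spec : Claim_equal_no_same_color_or_symbol := by
  intro assignments _
  unfold Spec_no_same_color_or_symbol
  set ps := pvFounders.zip assignments with hps
  have hnd : (ps.map Prod.fst).Nodup :=
    (pvZip_fst_sublist pvFounders assignments).nodup (by decide)
  rw [Bool.eq_iff_iff]
  unfold no_same_color_or_symbol no_same_color_or_symbol_alt
  rw [← hps, pvLoopA_iff ps hnd, pvLoopB_iff, List.pairwise_iff_forall_sublist]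
  constructor
  · intro h a b hsub heq hmem
    have h2 := h a.2 hmem
    exact ⟨h2.1 a b hsub rfl heq.symm, h2.2 a b hsub rfl heq.symm⟩
  · intro h house hmem
    refine ⟨fun a b hsub ha hb => ?_, fun a b hsub ha hb => ?_⟩
    · exact (h hsub (ha.trans hb.symm) (ha ▸ hmem)).1
    · exact (h hsub (ha.trans hb.symm) (ha ▸ hmem)).2
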